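-- pv_equiv track=rewrite | github.com/united-pooh/AstrBot | astrbot/builtin_stars/builtin_commands/commands/provider.py | _resolve_model_name
-- ===== SOURCE A (Python) =====
-- from collections.abc import Sequence
--
-- def _resolve_model_name(
--
--     model_name: str,
--     models: Sequence[str],
-- ) -> str | None:
--     """Resolve model name with precedence:
--     exact > case-insensitive > provider-qualified suffix.
--     """
--     requested = model_name.strip()
--     if not requested:
--         return None
--
--     requested_norm = requested.casefold()
--
--     # exact / case-insensitive match
--     for candidate in models:
--         if candidate == requested or candidate.casefold() == requested_norm:
--             return candidate
--
--     # provider-qualified suffix match: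
--     # e.g. candidate `openai/gpt-4o` should match requested `gpt-4o`.
--     for candidate in models:
--         cand_norm = candidate.casefold()
--         if cand_norm.endswith(f"/{requested_norm}") or cand_norm.endswith(
--             f":{requested_norm}"
--         ):
--             return candidate
--
--     return None
-- ===== SOURCE B (Python) =====
-- def _resolve_model_name(model_name, models):
--     requested = model_name.strip()
--     if not requested:
--         return None
--     requested_norm = requested.casefold()
--
--     def score(candidate):
--         cand_norm = candidate.casefold()
--         if candidate == requested or cand_norm == requested_norm:
--             return 0
--         if cand_norm.endswith("/" + requested_norm) or cand_norm.endswith(":" + requested_norm):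
--             return 1
--         return 2
--
--     scored = [(score(candidate), i) for i, candidate in enumerate(models)]
--     if not scored:
--         return None
--     s, i = min(scored)
--     if s == 2:
--         return None
--     return models[i]
-- ===== Notes on version B (the rewrite author's own statement) =====
-- stated objective: alternative
-- what changed: Replaces A's two staged scans (exact/CI first, then suffix) with a rank-and-select decomposition: every model gets a precedence score (0 exact/CI, 1 suffix, 2 none) and the answer is the lexicographic minimum of (score, index) pairs, i.e. the first best-scored candidate.
import Mathlib
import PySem

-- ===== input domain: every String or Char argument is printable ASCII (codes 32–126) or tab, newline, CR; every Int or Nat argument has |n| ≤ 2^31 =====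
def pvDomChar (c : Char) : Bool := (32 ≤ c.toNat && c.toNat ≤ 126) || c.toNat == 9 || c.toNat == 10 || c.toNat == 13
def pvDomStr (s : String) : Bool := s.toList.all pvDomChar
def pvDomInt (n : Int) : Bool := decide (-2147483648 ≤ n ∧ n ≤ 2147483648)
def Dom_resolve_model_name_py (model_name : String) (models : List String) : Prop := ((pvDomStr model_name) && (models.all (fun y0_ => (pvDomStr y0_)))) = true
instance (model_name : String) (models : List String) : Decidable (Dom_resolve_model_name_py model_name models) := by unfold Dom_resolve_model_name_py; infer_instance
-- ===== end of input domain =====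

-- B replaces A's two staged scans by a rank-and-select decomposition: score every model (0 exact/CI, 1 suffix, 2 none) and take the lexicographic minimum of (score, index) — alternative decomposition, same cost.


-- ===== PORT A =====
-- first loop: exact / case-insensitive match (casefold = lower on the ASCII domain)
def pvA_loop1 (requested requested_norm : String) : List String → Option String
  | [] => none
  | c :: rest =>
    if c == requested || PySem.Str.lower c == requested_norm then some c
    else pvA_loop1 requested requested_norm rest

-- second loop: provider-qualified suffix match
def pvA_loop2 (requested_norm : String) : List String → Option String
  | [] => none
  | c :: rest =>
    let cand_norm := PySem.Str.lower c
    if PySem.Str.endswith cand_norm ("/" ++ requested_norm)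
        || PySem.Str.endswith cand_norm (":" ++ requested_norm) then some c
    else pvA_loop2 requested_norm rest

def resolve_model_name_py (model_name : String) (models : List String) : Option String :=
  let requested := PySem.Str.strip model_name
  if requested == "" then none
  else
    let requested_norm := PySem.Str.lower requested
    match pvA_loop1 requested requested_norm models with
    | some c => some c
    | none => pvA_loop2 requested_norm models

-- ===== PORT B =====
-- precedence score of a candidate: 0 exact/case-insensitive, 1 provider-qualified suffix, 2 no match
def pvScore (requested requested_norm : String) (candidate : String) : Nat :=
  let cand_norm := PySem.Str.lower candidate
  if candidate == requested || cand_norm == requested_norm then 0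
  else if PySem.Str.endswith cand_norm ("/" ++ requested_norm)
      || PySem.Str.endswith cand_norm (":" ++ requested_norm) then 1
  else 2

-- score every model, take the lexicographic minimum of (score, index), reject score 2
def resolve_model_name_py_alt (model_name : String) (models : List String) : Option String :=
  let requested := PySem.Str.strip model_name
  if requested == "" then none
  else
    let requested_norm := PySem.Str.lower requested
    let scored := (PySem.List.enumerate models).map
      (fun p => (pvScore requested requested_norm p.2, p.1))
    match PySem.List.min2? scored (fun t => t.1) (fun t => t.2) with
    | none => none
    | some si => if si.1 == 2 then none else PySem.List.pyGet? models si.2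

-- ===== PRECONDITION & SPEC =====
def Spec_resolve_model_name_py (model_name : String) (models : List String) (out : Option String) : Prop := out = resolve_model_name_py_alt model_name models
instance (model_name : String) (models : List String) (out : Option String) : Decidable (Spec_resolve_model_name_py model_name models out) := by unfold Spec_resolve_model_name_py; infer_instance

-- ===== CLAIM (what is proved, stated in full; the proofs are below) =====
def Claim_equal_resolve_model_name_py : Prop := ∀ (model_name : String) (models : List String), Dom_resolve_model_name_py model_name models → Spec_resolve_model_name_py model_name models (resolve_model_name_py model_name models)

-- ===== LEMMAS AND PROOFS =====
-- the step function of min2? with keys fst / snd on (Nat × Int), named for the proofs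
def pvUpd (acc : Option (Nat × Int)) (x : Nat × Int) : Option (Nat × Int) :=
  match acc with
  | none => some x
  | some m =>
    if (decide (x.1 < m.1) || !decide (m.1 < x.1) && decide (x.2 < m.2)) = true then some x
    else some m

theorem pvMin2_eq_foldl (xs : List (Nat × Int)) :
    PySem.List.min2? xs (fun t => t.1) (fun t => t.2) = xs.foldl pvUpd none := by
  unfold PySem.List.min2?
  congr 1
  funext acc x
  cases acc <;> rfl

theorem pvA_loop1_cons (req rn c : String) (rest : List String) :
    pvA_loop1 req rn (c :: rest) =
      if c == req || PySem.Str.lower c == rn then some c else pvA_loop1 req rn rest := rfl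

theorem pvA_loop2_cons (rn c : String) (rest : List String) :
    pvA_loop2 rn (c :: rest) =
      if PySem.Str.endswith (PySem.Str.lower c) ("/" ++ rn)
          || PySem.Str.endswith (PySem.Str.lower c) (":" ++ rn) then some c
      else pvA_loop2 rn rest := rfl

theorem pvScore_le (req rn c : String) : pvScore req rn c ≤ 2 := by
  simp only [pvScore]; split_ifs <;> omega

theorem pvScore_eq_zero_iff (req rn c : String) :
    pvScore req rn c = 0 ↔ (c == req || PySem.Str.lower c == rn) = true := by
  simp only [pvScore]; split_ifs <;> simp_all

theorem pvScore_eq_one_iff (req rn c : String) :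
    pvScore req rn c = 1 ↔ (¬ (c == req || PySem.Str.lower c == rn) = true ∧
      (PySem.Str.endswith (PySem.Str.lower c) ("/" ++ rn)
        || PySem.Str.endswith (PySem.Str.lower c) (":" ++ rn)) = true) := by
  simp only [pvScore]; split_ifs <;> simp_all

theorem pvScore_eq_two_iff (req rn c : String) :
    pvScore req rn c = 2 ↔ (¬ (c == req || PySem.Str.lower c == rn) = true ∧
      ¬ (PySem.Str.endswith (PySem.Str.lower c) ("/" ++ rn)
        || PySem.Str.endswith (PySem.Str.lower c) (":" ++ rn)) = true) := by
  simp only [pvScore]; split_ifs <;> simp_all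

-- restarting the first-minimum fold from `some a` = combining `a` (left-biased) with the fold from `none`
theorem pvFoldl_some (xs : List (Nat × Int)) (a : Nat × Int) :
    xs.foldl pvUpd (some a) =
      match xs.foldl pvUpd none with
      | none => some a
      | some m =>
        if (decide (m.1 < a.1) || !decide (a.1 < m.1) && decide (m.2 < a.2)) = true then some m
        else some a := by
  induction xs generalizing a with
  | nil => rfl
  | cons x xs ih =>
    have hxs : (x :: xs).foldl pvUpd none =
        (match xs.foldl pvUpd none with
         | none => some x
         | some m =>
           if (decide (m.1 < x.1) || !decide (x.1 < m.1) && decide (m.2 < x.2)) = true then some m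
           else some x) := by
      rw [List.foldl_cons, show pvUpd none x = some x from rfl]; exact ih x
    rw [hxs, List.foldl_cons,
      show pvUpd (some a) x =
        (if (decide (x.1 < a.1) || !decide (a.1 < x.1) && decide (x.2 < a.2)) = true
         then some x else some a) from rfl]
    rcases a with ⟨a1, a2⟩; rcases x with ⟨x1, x2⟩
    by_cases hc : (decide (x1 < a1) || !decide (a1 < x1) && decide (x2 < a2)) = true
    · rw [if_pos hc, ih]
      cases hm : xs.foldl pvUpd none with
      | none => simp_all
      | some m =>
        rcases m with ⟨m1, m2⟩
        simp only []
        split_ifs <;> simp_all [Prod.mk.injEq] <;> omega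
    · rw [if_neg hc, ih]
      cases hm : xs.foldl pvUpd none with
      | none => simp_all
      | some m =>
        rcases m with ⟨m1, m2⟩
        simp only []
        split_ifs <;> simp_all [Prod.mk.injEq] <;> omega

-- characterization of B's rank-and-select fold against A's two loops, generalized over the start index
theorem pvChar (req rn : String) (l : List String) (k : Int) :
    (match ((PySem.List.enumerate l k).map (fun p => (pvScore req rn p.2, p.1))).foldl pvUpd none with
     | none => l = []
     | some si =>
         k ≤ si.2 ∧ si.1 ≤ 2 ∧
         ∃ c, l[(si.2 - k).toNat]? = some c ∧
           (si.1 = 0 → pvA_loop1 req rn l = some c) ∧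
           (si.1 = 1 → pvA_loop1 req rn l = none ∧ pvA_loop2 rn l = some c) ∧
           (si.1 = 2 → pvA_loop1 req rn l = none ∧ pvA_loop2 rn l = none)) := by
  induction l generalizing k with
  | nil => simp [PySem.List.enumerate]
  | cons c rest ih =>
    have henum : PySem.List.enumerate (c :: rest) k = (k, c) :: PySem.List.enumerate rest (k + 1) := by
      simp [PySem.List.enumerate]
    rw [henum]
    simp only [List.map_cons, List.foldl_cons]
    rw [show pvUpd none (pvScore req rn c, k) = some (pvScore req rn c, k) from rfl, pvFoldl_some]
    have hrest := ih (k + 1)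
    cases hm : ((PySem.List.enumerate rest (k + 1)).map (fun p => (pvScore req rn p.2, p.1))).foldl pvUpd none with
    | none =>
      rw [hm] at hrest
      subst hrest
      simp only []
      refine ⟨le_refl k, pvScore_le req rn c, c, by simp, ?_, ?_, ?_⟩
      · intro hsc
        have hc := (pvScore_eq_zero_iff req rn c).mp hsc
        rw [pvA_loop1_cons, if_pos hc]
      · intro hsc
        obtain ⟨hc0, hc1⟩ := (pvScore_eq_one_iff req rn c).mp hsc
        exact ⟨by rw [pvA_loop1_cons, if_neg hc0]; rfl,
          by rw [pvA_loop2_cons, if_pos hc1]⟩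
      · intro hsc
        obtain ⟨hc0, hc1⟩ := (pvScore_eq_two_iff req rn c).mp hsc
        exact ⟨by rw [pvA_loop1_cons, if_neg hc0]; rfl,
          by rw [pvA_loop2_cons, if_neg hc1]; rfl⟩
    | some si =>
      rw [hm] at hrest
      rcases si with ⟨s', i'⟩
      obtain ⟨hk, hs2, c', hget, h0', h1', h2'⟩ := hrest
      simp only [] at hk hs2 hget h0' h1' h2' ⊢
      by_cases hlt : (decide (s' < pvScore req rn c) || !decide (pvScore req rn c < s') && decide (i' < k)) = true
      · -- the minimum comes from rest
        rw [if_pos hlt]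
        have hs'lt : s' < pvScore req rn c := by
          simp only [Bool.or_eq_true, Bool.and_eq_true, Bool.not_eq_eq_eq_not, Bool.not_true,
            decide_eq_true_eq, decide_eq_false_iff_not] at hlt
          rcases hlt with h | ⟨h1, h2⟩
          · exact h
          · omega
        have hcnot0 : ¬ (c == req || PySem.Str.lower c == rn) = true := by
          intro hc
          have := (pvScore_eq_zero_iff req rn c).mpr hc
          omega
        refine ⟨by omega, hs2, c', ?_, ?_, ?_, ?_⟩
        · have hidx : (i' - k).toNat = (i' - (k + 1)).toNat + 1 := by omega
          rw [hidx]
          simpa using hget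
        · intro hsc
          rw [pvA_loop1_cons, if_neg hcnot0]
          exact h0' hsc
        · intro hsc
          have hsc2 : pvScore req rn c = 2 := by have := pvScore_le req rn c; omega
          obtain ⟨_, hcnot1⟩ := (pvScore_eq_two_iff req rn c).mp hsc2
          refine ⟨?_, ?_⟩
          · rw [pvA_loop1_cons, if_neg hcnot0]
            exact (h1' hsc).1
          · rw [pvA_loop2_cons, if_neg hcnot1]
            exact (h1' hsc).2
        · intro hsc; have := pvScore_le req rn c; omega
      · -- the head (score of c, index k) wins
        rw [if_neg hlt]
        have hge : pvScore req rn c ≤ s' := by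
          simp only [Bool.or_eq_true, Bool.and_eq_true, Bool.not_eq_eq_eq_not, Bool.not_true,
            decide_eq_true_eq, decide_eq_false_iff_not] at hlt
          omega
        refine ⟨le_refl k, pvScore_le req rn c, c, by simp, ?_, ?_, ?_⟩
        · intro hsc
          have hc := (pvScore_eq_zero_iff req rn c).mp hsc
          rw [pvA_loop1_cons, if_pos hc]
        · intro hsc
          obtain ⟨hc0, hc1⟩ := (pvScore_eq_one_iff req rn c).mp hsc
          have hrest1 : pvA_loop1 req rn rest = none := by
            have hcase : s' = 1 ∨ s' = 2 := by omega
            rcases hcase with h | h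
            · exact (h1' h).1
            · exact (h2' h).1
          refine ⟨?_, ?_⟩
          · rw [pvA_loop1_cons, if_neg hc0]
            exact hrest1
          · rw [pvA_loop2_cons, if_pos hc1]
        · intro hsc
          have hs'2 : s' = 2 := by omega
          obtain ⟨hc0, hc1⟩ := (pvScore_eq_two_iff req rn c).mp hsc
          refine ⟨?_, ?_⟩
          · rw [pvA_loop1_cons, if_neg hc0]
            exact (h2' hs'2).1
          · rw [pvA_loop2_cons, if_neg hc1]
            exact (h2' hs'2).2

-- ===== VERDICT (by name: the statement is the Claim_ definition above) =====
theorem resolve_model_name_py_spec : Claim_equal_resolve_model_name_py := by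
  intro model_name models _
  unfold Spec_resolve_model_name_py resolve_model_name_py resolve_model_name_py_alt
  by_cases h : PySem.Str.strip model_name == ""
  · simp [h]
  · simp only [h, if_false, Bool.false_eq_true]
    rw [pvMin2_eq_foldl]
    have hchar := pvChar (PySem.Str.strip model_name)
      (PySem.Str.lower (PySem.Str.strip model_name)) models 0
    cases hm : ((PySem.List.enumerate models 0).map
        (fun p => (pvScore (PySem.Str.strip model_name)
          (PySem.Str.lower (PySem.Str.strip model_name)) p.2, p.1))).foldl pvUpd none with
    | none =>
      rw [hm] at hchar
      subst hchar
      simp [pvA_loop1, pvA_loop2]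
    | some si =>
      rw [hm] at hchar
      rcases si with ⟨s, i⟩
      obtain ⟨hk, hs2, c, hget, h0, h1, h2⟩ := hchar
      have hget' : PySem.List.pyGet? models i = some c := by
        have hi : i = ((i.toNat : Nat) : Int) := (Int.toNat_of_nonneg hk).symm
        rw [hi, PySem.List.pyGet?_natCast]
        simpa using hget
      simp only []
      interval_cases s
      · rw [h0 rfl]; simp [hget']
      · rw [(h1 rfl).1, (h1 rfl).2]; simp [hget']
      · rw [(h2 rfl).1, (h2 rfl).2]; simp
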